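-- pv_equiv track=rewrite | github.com/Ejpm21/belajar-python | PythonDasar/contoh/gabungDictionary.py | gabungkan_stok
-- ===== SOURCE A (Python) =====
-- def gabungkan_stok(stok_a,stok_b):
--     # stok_total= stok_a |jika terjadi perubahan pada stok_total maka saat memanggil stok a setelah function akan
--     # menyebabkan stok a ikut berubah jadi gunakan .copy() untuk memastikan ini 2 entitas yang berbeda
--     # itu terjadi di file gudang.py
--     stok_total = stok_a.copy()
--     for key, value in stok_b.items():
--         if key in stok_total:
--             stok_total[key] += value
--         else:
--             stok_total[key] = value
--     return stok_total
-- ===== SOURCE B (Python) =====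
-- def gabungkan_stok(stok_a, stok_b):
--     # union-first: ordered union of keys, then one symmetric get+get pass
--     keys = dict.fromkeys(list(stok_a) + list(stok_b))
--     return {k: stok_a.get(k, 0) + stok_b.get(k, 0) for k in keys}
-- ===== Notes on version B (the rewrite author's own statement) =====
-- stated objective: alternative
-- what changed: Instead of copying stok_a and conditionally accumulating stok_b entry by entry (branching on key membership), B first builds the ordered union of keys via dict.fromkeys and then produces every entry in one uniform get(k,0)+get(k,0) comprehension with no branches.
import Mathlib
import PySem

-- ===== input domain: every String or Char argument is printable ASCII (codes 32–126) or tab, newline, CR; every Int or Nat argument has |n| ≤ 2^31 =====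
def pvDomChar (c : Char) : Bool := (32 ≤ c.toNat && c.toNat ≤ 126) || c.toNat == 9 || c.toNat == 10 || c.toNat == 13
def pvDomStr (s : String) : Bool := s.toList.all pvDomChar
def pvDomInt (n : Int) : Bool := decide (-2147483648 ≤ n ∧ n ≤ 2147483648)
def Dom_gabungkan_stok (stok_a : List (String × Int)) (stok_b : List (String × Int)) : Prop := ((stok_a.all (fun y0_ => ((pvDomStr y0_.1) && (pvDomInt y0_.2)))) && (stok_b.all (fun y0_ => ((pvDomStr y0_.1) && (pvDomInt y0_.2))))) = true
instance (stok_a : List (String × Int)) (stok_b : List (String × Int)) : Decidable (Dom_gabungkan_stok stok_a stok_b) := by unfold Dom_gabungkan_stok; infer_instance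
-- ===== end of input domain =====

-- B replaces A's copy-then-conditionally-accumulate loop by a union-of-keys pass followed by a
-- uniform branch-free get+get over every key; same cost, different decomposition.

-- ===== PORT A =====
-- stok_total = stok_a.copy(); for key, value in stok_b.items(): if key in stok_total: += else: =
def gabungkan_stok (stok_a : List (String × Int)) (stok_b : List (String × Int)) : List (String × Int) :=
  (stok_b.foldl
    (fun d kv =>
      if d.contains kv.1 then d.insert kv.1 (d.getD kv.1 0 + kv.2)
      else d.insert kv.1 kv.2)
    (PySem.Dict.mk stok_a)).items

-- ===== PORT B =====
-- keys = dict.fromkeys(list(stok_a) + list(stok_b)); {k: stok_a.get(k,0) + stok_b.get(k,0) for k in keys}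
def gabungkan_stok_alt (stok_a : List (String × Int)) (stok_b : List (String × Int)) : List (String × Int) :=
  let keys := PySem.List.dedup (stok_a.map Prod.fst ++ stok_b.map Prod.fst)
  (keys.foldl
    (fun d k => d.insert k ((PySem.Dict.mk stok_a).getD k 0 + (PySem.Dict.mk stok_b).getD k 0))
    PySem.Dict.empty).items

-- ===== PRECONDITION & SPEC =====
-- Pre_ excludes association lists with duplicate keys: such lists do not represent a Python dict
-- (the arguments of A are dicts, whose keys are unique by construction).
def Pre_gabungkan_stok (stok_a : List (String × Int)) (stok_b : List (String × Int)) : Prop :=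
  (stok_a.map Prod.fst).Nodup ∧ (stok_b.map Prod.fst).Nodup
instance (stok_a : List (String × Int)) (stok_b : List (String × Int)) : Decidable (Pre_gabungkan_stok stok_a stok_b) := by unfold Pre_gabungkan_stok; infer_instance
def pvWitness_gabungkan_stok : (List (String × Int)) × (List (String × Int)) :=
  ([("apel", 5), ("jeruk", 3)], [("jeruk", 2), ("mangga", 7)])
def Spec_gabungkan_stok (stok_a : List (String × Int)) (stok_b : List (String × Int)) (out : List (String × Int)) : Prop := out = gabungkan_stok_alt stok_a stok_b
instance (stok_a : List (String × Int)) (stok_b : List (String × Int)) (out : List (String × Int)) : Decidable (Spec_gabungkan_stok stok_a stok_b out) := by unfold Spec_gabungkan_stok; infer_instance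

-- ===== CLAIM (what is proved, stated in full; the proofs are below) =====
def Claim_equal_gabungkan_stok : Prop := ∀ (stok_a : List (String × Int)) (stok_b : List (String × Int)), Dom_gabungkan_stok stok_a stok_b → Pre_gabungkan_stok stok_a stok_b → Spec_gabungkan_stok stok_a stok_b (gabungkan_stok stok_a stok_b)

-- ===== LEMMAS AND PROOFS =====

-- a key absent from an association list looks up to the default
theorem pv_getD_mk_of_not_mem (l : List (String × Int)) (k : String)
    (h : k ∉ l.map Prod.fst) : (PySem.Dict.mk l).getD k 0 = 0 := by
  apply PySem.Dict.getD_of_get?_eq_none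
  rw [PySem.Dict.get?_eq_none_iff_not_mem_keys]
  simpa using h

-- A's accumulation loop from any nodup-keyed dict equals the union-of-keys map
theorem pv_loop_eq (b : List (String × Int)) (d : PySem.Dict String Int)
    (hd : d.keys.Nodup) (hb : (b.map Prod.fst).Nodup) :
    (b.foldl
      (fun d kv =>
        if d.contains kv.1 then d.insert kv.1 (d.getD kv.1 0 + kv.2)
        else d.insert kv.1 kv.2) d).items =
    (PySem.Set.ofList (d.keys ++ b.map Prod.fst)).map
      (fun k => (k, d.getD k 0 + (PySem.Dict.mk b).getD k 0)) := by
  induction b generalizing d with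
  | nil =>
      simp only [List.foldl_nil, List.map_nil, List.append_nil]
      rw [PySem.Set.ofList_eq_self_of_nodup d.keys hd, PySem.Dict.items_eq_map_keys d hd 0]
      simp [PySem.Dict.getD_eq_get?_getD, PySem.Dict.get?]
  | cons kv rest ih =>
      obtain ⟨k, v⟩ := kv
      simp only [List.map_cons] at hb ⊢
      have hk : k ∉ rest.map Prod.fst := by
        simp only [List.nodup_cons] at hb; exact hb.1
      have hrest : (rest.map Prod.fst).Nodup := by
        simp only [List.nodup_cons] at hb; exact hb.2
      have hstep : (if d.contains k then d.insert k (d.getD k 0 + v)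
          else d.insert k v) = d.insert k (d.getD k 0 + v) := by
        by_cases h : d.contains k = true
        · simp [h]
        · have h' : d.contains k = false := by simpa using h
          have h0 : d.getD k 0 = 0 := PySem.Dict.getD_of_not_contains d (0 : Int) h'
          simp [h, h0]
      rw [List.foldl_cons, hstep,
        ih (d.insert k (d.getD k 0 + v)) (PySem.Dict.nodup_keys_insert d k _ hd) hrest]
      have hfun : (fun k' => (k', (d.insert k (d.getD k 0 + v)).getD k' 0 +
            (PySem.Dict.mk rest).getD k' 0)) =
          (fun k' => (k', d.getD k' 0 + (PySem.Dict.mk ((k, v) :: rest)).getD k' 0)) := by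
        funext k'
        by_cases hkk : k' = k
        · subst hkk
          rw [PySem.Dict.getD_insert_self, pv_getD_mk_of_not_mem rest k' hk]
          simp [PySem.Dict.getD_eq_get?_getD, PySem.Dict.get?_mk_cons]
        · rw [PySem.Dict.getD_insert_of_ne d _ _ hkk]
          simp [PySem.Dict.getD_eq_get?_getD, PySem.Dict.get?_mk_cons, Ne.symm hkk]
      rw [hfun]
      congr 1
      -- key order: (d.insert k w).keys ++ rest-keys dedups like d.keys ++ k :: rest-keys
      by_cases h : d.contains k = true
      · rw [PySem.Dict.keys_insert_of_contains d _ h]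
        have hkmem : k ∈ PySem.Set.ofList d.keys := by
          rw [PySem.Set.mem_ofList]
          exact (PySem.Dict.contains_iff_mem_keys d k).mp h
        rw [PySem.Set.ofList_append, PySem.Set.ofList_append,
          PySem.Set.update_cons, PySem.Set.add_of_mem hkmem]
      · rw [PySem.Dict.keys_insert_of_not_contains d _ (by simpa using h),
          List.append_assoc]
        simp

-- ===== VERDICT (by name: the statement is the Claim_ definition above) =====
theorem gabungkan_stok_spec : Claim_equal_gabungkan_stok := by
  intro a b _ hpre
  unfold Spec_gabungkan_stok gabungkan_stok gabungkan_stok_alt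
  have hka : (PySem.Dict.mk a).keys = a.map Prod.fst := by
    simp [PySem.Dict.keys]
  rw [pv_loop_eq b (PySem.Dict.mk a) (by rw [hka]; exact hpre.1) hpre.2, hka]
  rw [PySem.Dict.items_foldl_insert_fresh _ _ _ _
    (fun x _ => PySem.Dict.contains_empty x)
    (by simp [PySem.List.dedup_eq_ofList, PySem.Set.nodup_ofList])]
  simp [PySem.List.dedup_eq_ofList, PySem.Dict.empty]
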